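-- pv_equiv track=rewrite | github.com/DanielNobbe/ignition | src/ignition/utils.py | split_dict_at_index
-- ===== SOURCE A (Python) =====
-- import numbers
--
-- def split_dict_at_index(d: dict, index: int) -> tuple[dict, dict]:
--     """Split a dictionary into two parts at the given index."""
--     if not isinstance(d, dict):
--         raise TypeError("Input must be a dictionary.")
--     if not isinstance(index, numbers.Integral):
--         raise TypeError("Index must be an integer.")
--
--     keys = list(d.keys())
--     if index < 0 or index > len(keys):
--         raise IndexError("Index out of range.")
--
--     first_part = {k: d[k] for k in keys[:index]}
--     second_part = {k: d[k] for k in keys[index:]}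
--
--     return first_part, second_part
-- ===== SOURCE B (Python) =====
-- import numbers
--
-- def split_dict_at_index(d: dict, index: int) -> tuple[dict, dict]:
--     """Split a dictionary into two parts at the given index."""
--     if not isinstance(d, dict):
--         raise TypeError("Input must be a dictionary.")
--     if not isinstance(index, numbers.Integral):
--         raise TypeError("Index must be an integer.")
--     if index < 0 or index > len(d):
--         raise IndexError("Index out of range.")
--
--     # One shared iterator over the items, consumed in two phases:
--     # no key-list materialisation, no slicing, no per-key lookups.
--     it = iter(d.items())
--     first_part = dict(next(it) for _ in range(index))
--     second_part = dict(it)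
--     return first_part, second_part
-- ===== Notes on version B (the rewrite author's own statement) =====
-- stated objective: alternative
-- what changed: Instead of materialising the key list, slicing it twice and re-looking up each key with two dict comprehensions, B consumes a single items() iterator in two phases (first index entries, then the rest), touching each entry exactly once with no lookups.
import Mathlib
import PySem

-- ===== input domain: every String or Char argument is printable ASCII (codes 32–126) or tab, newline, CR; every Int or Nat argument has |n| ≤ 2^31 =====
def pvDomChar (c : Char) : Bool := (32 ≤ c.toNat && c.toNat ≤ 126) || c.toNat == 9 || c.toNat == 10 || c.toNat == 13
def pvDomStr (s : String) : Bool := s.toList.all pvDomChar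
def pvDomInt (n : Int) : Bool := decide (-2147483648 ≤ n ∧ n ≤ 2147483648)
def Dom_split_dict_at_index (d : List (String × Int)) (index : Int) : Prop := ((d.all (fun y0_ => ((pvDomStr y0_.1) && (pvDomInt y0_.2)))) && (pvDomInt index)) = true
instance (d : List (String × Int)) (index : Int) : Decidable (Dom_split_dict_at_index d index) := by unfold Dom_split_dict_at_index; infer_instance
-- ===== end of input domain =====

-- B replaces A's key-list slicing + two lookup comprehensions by one items() iterator consumed
-- in two phases (alternative decomposition, same cost); equivalence is about the return value.

-- ===== PORT A =====
-- keys = list(d.keys()); first = {k: d[k] for k in keys[:index]}; second = {k: d[k] for k in keys[index:]}.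
-- d[k] is ported as getD k 0: every k comes from keys, so the lookup never misses (the default is dead).
def split_dict_at_index (d : List (String × Int)) (index : Int) : (List (String × Int)) × (List (String × Int)) :=
  let dd := PySem.Dict.ofList d
  let keys := dd.keys
  let first_part := (PySem.List.slice keys none (some index)).map (fun k => (k, dd.getD k 0))
  let second_part := (PySem.List.slice keys (some index) none).map (fun k => (k, dd.getD k 0))
  (first_part, second_part)

-- ===== PORT B =====
-- next(it) for _ in range(index): take `index` entries off the front of the item iterator; the
-- remainder of the iterator is the second dict. Under Pre_ the iterator never runs dry.
def pvConsume (n : Nat) (it : List (String × Int)) : (List (String × Int)) × (List (String × Int)) :=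
  match n, it with
  | 0, rest => ([], rest)
  | _ + 1, [] => ([], [])        -- unreachable under Pre_ (index ≤ len(d))
  | n + 1, p :: rest => let (f, s) := pvConsume n rest; (p :: f, s)

def split_dict_at_index_alt (d : List (String × Int)) (index : Int) : (List (String × Int)) × (List (String × Int)) :=
  let dd := PySem.Dict.ofList d
  pvConsume index.toNat dd.items

-- ===== PRECONDITION & SPEC =====
-- A raises IndexError iff index < 0 or index > len(d) (dict length, i.e. after key dedup); Pre_ is exactly A's returning inputs.
def Pre_split_dict_at_index (d : List (String × Int)) (index : Int) : Prop :=
  0 ≤ index ∧ index ≤ (PySem.Dict.ofList d).size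

instance (d : List (String × Int)) (index : Int) : Decidable (Pre_split_dict_at_index d index) := by unfold Pre_split_dict_at_index; infer_instance

def pvWitness_split_dict_at_index : (List (String × Int)) × Int := ([("a", 1), ("b", 2)], 1)

def Spec_split_dict_at_index (d : List (String × Int)) (index : Int) (out : (List (String × Int)) × (List (String × Int))) : Prop := out = split_dict_at_index_alt d index
instance (d : List (String × Int)) (index : Int) (out : (List (String × Int)) × (List (String × Int))) : Decidable (Spec_split_dict_at_index d index out) := by unfold Spec_split_dict_at_index; infer_instance

-- ===== CLAIM (what is proved, stated in full; the proofs are below) =====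
def Claim_equal_split_dict_at_index : Prop := ∀ (d : List (String × Int)) (index : Int), Dom_split_dict_at_index d index → Pre_split_dict_at_index d index → Spec_split_dict_at_index d index (split_dict_at_index d index)

-- ===== LEMMAS AND PROOFS =====

theorem pvConsume_eq_take_drop (n : Nat) (it : List (String × Int)) :
    pvConsume n it = (it.take n, it.drop n) := by
  induction n generalizing it with
  | zero => simp [pvConsume]
  | succ n ih =>
    cases it with
    | nil => simp [pvConsume]
    | cons p rest => simp [pvConsume, ih]

theorem split_dict_at_index_spec : Claim_equal_split_dict_at_index := by
  intro d index _ hpre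
  unfold Spec_split_dict_at_index split_dict_at_index split_dict_at_index_alt
  obtain ⟨h0, _⟩ := hpre
  set dd := PySem.Dict.ofList d with hdd
  obtain ⟨n, rfl⟩ : ∃ n : Nat, index = (n : Int) := ⟨index.toNat, (Int.toNat_of_nonneg h0).symm⟩
  have hitems : dd.items = dd.keys.map (fun k => (k, dd.getD k 0)) :=
    PySem.Dict.items_eq_map_keys dd (hdd ▸ PySem.Dict.nodup_keys_ofList d) 0
  simp [PySem.List.slice_to_natCast, PySem.List.slice_from_natCast, pvConsume_eq_take_drop,
        hitems, List.map_take, List.map_drop]
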